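-- pv_equiv track=rewrite | github.com/coocos/advent-of-code-2020 | aoc/day14/puzzle.py | generate_masks
-- ===== SOURCE A (Python) =====
-- def generate_masks(pre, post=""):
--
--     if not pre:
--         yield post
--         return
--
--     if pre[0] == "X":
--         yield from generate_masks(pre[1:], post + "1")
--         yield from generate_masks(pre[1:], post + "0")
--     else:
--         yield from generate_masks(pre[1:], post + pre[0])
-- ===== SOURCE B (Python) =====
-- def generate_masks(pre, post=""):
--     results = [post]
--     for c in pre:
--         if c == "X":
--             results = [r + b for r in results for b in "10"]
--         else:
--             results = [r + c for r in results]
--     yield from results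
-- ===== Notes on version B (the rewrite author's own statement) =====
-- stated objective: alternative
-- what changed: Replaces the character-by-character recursion (DFS over the two wildcard branches) with a single iterative left-to-right pass that maintains the whole list of expanded prefixes, doubling it at each wildcard.
import Mathlib
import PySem

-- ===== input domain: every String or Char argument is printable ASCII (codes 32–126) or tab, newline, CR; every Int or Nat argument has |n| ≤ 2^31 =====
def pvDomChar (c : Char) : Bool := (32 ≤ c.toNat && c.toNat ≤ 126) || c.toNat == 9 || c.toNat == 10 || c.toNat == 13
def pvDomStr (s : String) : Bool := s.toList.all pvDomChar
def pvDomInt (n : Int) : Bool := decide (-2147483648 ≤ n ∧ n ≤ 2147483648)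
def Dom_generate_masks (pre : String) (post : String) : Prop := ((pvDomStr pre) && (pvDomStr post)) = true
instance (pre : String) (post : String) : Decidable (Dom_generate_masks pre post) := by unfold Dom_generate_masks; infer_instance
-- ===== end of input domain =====

-- B replaces A's recursion (branching at each 'X') by one iterative pass keeping the
-- full list of expanded prefixes; same cost, different decomposition (objective: alternative).

-- ===== PORT A =====
-- A's recursion, over the string as a list of chars (exact: yielded strings collected in order)
def generateMasksAux : List Char → List Char → List (List Char)
  | [], post => [post]
  | c :: rest, post =>
    if c = 'X' then
      generateMasksAux rest (post ++ ['1']) ++ generateMasksAux rest (post ++ ['0'])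
    else
      generateMasksAux rest (post ++ [c])

def generate_masks (pre : String) (post : String) : List String :=
  (generateMasksAux pre.toList post.toList).map String.ofList

-- ===== PORT B =====
-- one step of B's loop body: the two comprehensions
def generateMasksStep (c : Char) (rs : List (List Char)) : List (List Char) :=
  if c = 'X' then rs.flatMap (fun r => ['1', '0'].map (fun b => r ++ [b]))
  else rs.map (fun r => r ++ [c])

def generate_masks_alt (pre : String) (post : String) : List String :=
  (pre.toList.foldl (fun rs c => generateMasksStep c rs) [post.toList]).map String.ofList

-- ===== PRECONDITION & SPEC =====
def Spec_generate_masks (pre : String) (post : String) (out : List String) : Prop := out = generate_masks_alt pre post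
instance (pre : String) (post : String) (out : List String) : Decidable (Spec_generate_masks pre post out) := by unfold Spec_generate_masks; infer_instance

-- ===== CLAIM (what is proved, stated in full; the proofs are below) =====
def Claim_equal_generate_masks : Prop := ∀ (pre : String) (post : String), Dom_generate_masks pre post → Spec_generate_masks pre post (generate_masks pre post)

-- ===== LEMMAS AND PROOFS =====

-- the step distributes over append
theorem generateMasksStep_append (c : Char) (l1 l2 : List (List Char)) :
    generateMasksStep c (l1 ++ l2) = generateMasksStep c l1 ++ generateMasksStep c l2 := by
  unfold generateMasksStep
  split_ifs <;> simp

-- hence B's fold distributes over append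
theorem foldl_step_append (pre : List Char) (l1 l2 : List (List Char)) :
    pre.foldl (fun rs c => generateMasksStep c rs) (l1 ++ l2)
      = pre.foldl (fun rs c => generateMasksStep c rs) l1
        ++ pre.foldl (fun rs c => generateMasksStep c rs) l2 := by
  induction pre generalizing l1 l2 with
  | nil => simp
  | cons c rest ih =>
      simp only [List.foldl_cons, generateMasksStep_append]
      exact ih _ _

-- A's recursion equals B's fold started from a singleton
theorem aux_eq_fold (pre : List Char) (post : List Char) :
    generateMasksAux pre post = pre.foldl (fun rs c => generateMasksStep c rs) [post] := by
  induction pre generalizing post with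
  | nil => simp [generateMasksAux]
  | cons c rest ih =>
      rw [List.foldl_cons]
      by_cases hc : c = 'X'
      · rw [show generateMasksStep c [post] = [post ++ ['1']] ++ [post ++ ['0']] from by
          simp [generateMasksStep, hc]]
        rw [foldl_step_append]
        simp [generateMasksAux, hc, ih]
      · rw [show generateMasksStep c [post] = [post ++ [c]] from by
          simp [generateMasksStep, hc]]
        simp [generateMasksAux, hc, ih]

-- ===== VERDICT (by name: the statement is the Claim_ definition above) =====
theorem generate_masks_spec : Claim_equal_generate_masks := by
  intro pre post _
  unfold Spec_generate_masks generate_masks generate_masks_alt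
  rw [aux_eq_fold]
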